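-- pv_equiv track=rewrite | github.com/MikeSzklarz/Parallel-Computing | stencil/python_code/bench_stencil2d_pthreads.py | int_range_inclusive
-- ===== SOURCE A (Python) =====
-- def int_range_inclusive(start, stop, step):
--     if step <= 0:
--         raise ValueError("step must be > 0")
--     out, v = [], start
--     while v <= stop:
--         out.append(v)
--         v += step
--     return out
-- ===== SOURCE B (Python) =====
-- def int_range_inclusive(start, stop, step):
--     if step <= 0:
--         raise ValueError("step must be > 0")
--     n = (stop - start) // step + 1
--     return [start + i * step for i in range(n)]
-- ===== Notes on version B (the rewrite author's own statement) =====
-- stated objective: idiomatic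
-- what changed: Replaces the running-accumulator while-loop with a closed-form element count and an index-driven list comprehension.
import Mathlib
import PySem

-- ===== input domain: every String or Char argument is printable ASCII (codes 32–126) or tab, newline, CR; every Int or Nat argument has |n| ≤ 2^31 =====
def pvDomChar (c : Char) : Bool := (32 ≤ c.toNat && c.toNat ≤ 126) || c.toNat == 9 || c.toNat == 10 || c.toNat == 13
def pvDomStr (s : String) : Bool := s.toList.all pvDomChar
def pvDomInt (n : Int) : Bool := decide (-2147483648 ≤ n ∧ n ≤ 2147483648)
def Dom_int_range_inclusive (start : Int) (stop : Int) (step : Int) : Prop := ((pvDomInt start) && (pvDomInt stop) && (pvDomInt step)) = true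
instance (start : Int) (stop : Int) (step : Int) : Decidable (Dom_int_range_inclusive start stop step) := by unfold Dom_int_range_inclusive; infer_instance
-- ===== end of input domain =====

-- B replaces A's running-accumulator while-loop by a closed-form element count and an
-- index-driven materialization (same O(n) cost; objective: idiomatic).


-- ===== PORT A =====
-- the while-loop: while v <= stop: out.append(v); v += step   (0 < step guarantees termination)
def pvLoopA (stop step : Int) (hstep : 0 < step) (v : Int) : List Int :=
  if v ≤ stop then v :: pvLoopA stop step hstep (v + step) else []
termination_by (stop + 1 - v).toNat
decreasing_by omega

def int_range_inclusive (start : Int) (stop : Int) (step : Int) : List Int :=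
  if h : step ≤ 0 then []   -- Python raises ValueError here; excluded by Pre_
  else pvLoopA stop step (by omega) start

-- ===== PORT B =====
def int_range_inclusive_alt (start : Int) (stop : Int) (step : Int) : List Int :=
  if step ≤ 0 then []   -- Python raises ValueError here; excluded by Pre_
  else
    let n : Int := PySem.Int.floordiv (stop - start) step + 1
    (List.range n.toNat).map (fun (i : Nat) => start + (i : Int) * step)

-- ===== PRECONDITION & SPEC =====
-- Pre_ excludes step ≤ 0, on which the Python A raises ValueError.
def Pre_int_range_inclusive (start : Int) (stop : Int) (step : Int) : Prop := 0 < step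
instance (start : Int) (stop : Int) (step : Int) : Decidable (Pre_int_range_inclusive start stop step) := by unfold Pre_int_range_inclusive; infer_instance
def pvWitness_int_range_inclusive : Int × Int × Int := (0, 5, 2)

def Spec_int_range_inclusive (start : Int) (stop : Int) (step : Int) (out : List Int) : Prop := out = int_range_inclusive_alt start stop step
instance (start : Int) (stop : Int) (step : Int) (out : List Int) : Decidable (Spec_int_range_inclusive start stop step out) := by unfold Spec_int_range_inclusive; infer_instance

-- ===== CLAIM (what is proved, stated in full; the proofs are below) =====
def Claim_equal_int_range_inclusive : Prop := ∀ (start : Int) (stop : Int) (step : Int), Dom_int_range_inclusive start stop step → Pre_int_range_inclusive start stop step → Spec_int_range_inclusive start stop step (int_range_inclusive start stop step)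

-- ===== LEMMAS AND PROOFS =====

theorem pvLoopA_eq_map (stop step : Int) (hstep : 0 < step) (v : Int) :
    pvLoopA stop step hstep v
      = (List.range (PySem.Int.floordiv (stop - v) step + 1).toNat).map
          (fun (i : Nat) => v + (i : Int) * step) := by
  fun_induction pvLoopA stop step hstep v with
  | case1 v h ih =>
    simp only [PySem.Int.floordiv_eq_ediv_of_pos hstep] at ih ⊢
    have hvp : stop - (v + step) = (stop - v) + (-1) * step := by ring
    have hshift : (stop - (v + step)) / step = (stop - v) / step + (-1) := by
      rw [hvp, Int.add_mul_ediv_right _ _ (by omega : step ≠ 0)]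
    have hnn : 0 ≤ (stop - v) / step := Int.ediv_nonneg (by omega) (by omega)
    have hrange : ((stop - v) / step + 1).toNat
        = ((stop - (v + step)) / step + 1).toNat + 1 := by omega
    rw [ih, hrange, List.range_succ_eq_map, List.map_cons, List.map_map]
    simp only [Nat.cast_zero, zero_mul, add_zero]
    congr 1
    refine List.map_congr_left fun i _ => ?_
    simp only [Function.comp_apply, Nat.cast_succ]
    ring
  | case2 v h =>
    have hlt : PySem.Int.floordiv (stop - v) step < 0 :=
      (PySem.Int.floordiv_lt_iff_lt_mul hstep).mpr (by omega)
    have : (PySem.Int.floordiv (stop - v) step + 1).toNat = 0 := by omega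
    simp [this]

-- ===== VERDICT (by name: the statement is the Claim_ definition above) =====
theorem int_range_inclusive_spec : Claim_equal_int_range_inclusive := by
  intro start stop step _ hpre
  unfold Spec_int_range_inclusive int_range_inclusive int_range_inclusive_alt
  have h : ¬ step ≤ 0 := by exact not_le.mpr hpre
  simp only [h, dif_neg, if_neg, not_false_iff]
  exact pvLoopA_eq_map stop step (by omega) start
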